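-- pv_equiv track=rewrite | github.com/chanwoo-lee-cw/TIL | Algorithm_problem_solving/Programers/Cording_Test/Origami/origami.py | solution
-- ===== SOURCE A (Python) =====
-- def solution(n):
--     # basecase
--     answer = [0]
--     # recurrence relation
--     for i in range(1, n):
--         # store the current length so as not to reflect the extension of length
--         len_origami = len(answer)
--         # Since the center is always 0, append 0.
--         answer.append(0)
--         # Lt starts from the center and goes up in reverse order and attachtes symmetrically
--         for j in range(len_origami):
--             answer.append(0 if answer[len_origami-1-j] == 1 else 1)
--
--     return answer
-- ===== SOURCE B (Python) =====
-- def odd_part(q):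
--     while q % 2 == 0:
--         q //= 2
--     return q
--
--
-- def solution(n):
--     # regular paperfolding sequence by closed form: position p (1-based) is 0
--     # iff the odd part of p is congruent to 1 mod 4
--     L = 2 ** n - 1 if n > 1 else 1
--     return [0 if odd_part(p) % 4 == 1 else 1 for p in range(1, L + 1)]
-- ===== Notes on version B (the rewrite author's own statement) =====
-- stated objective: alternative
-- what changed: Replaces A's mirror-and-flip doubling recurrence (each pass re-reads and extends the list) by a direct closed form: each 1-based position p is computed independently as 0 iff the odd part of p is 1 mod 4.
import Mathlib
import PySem

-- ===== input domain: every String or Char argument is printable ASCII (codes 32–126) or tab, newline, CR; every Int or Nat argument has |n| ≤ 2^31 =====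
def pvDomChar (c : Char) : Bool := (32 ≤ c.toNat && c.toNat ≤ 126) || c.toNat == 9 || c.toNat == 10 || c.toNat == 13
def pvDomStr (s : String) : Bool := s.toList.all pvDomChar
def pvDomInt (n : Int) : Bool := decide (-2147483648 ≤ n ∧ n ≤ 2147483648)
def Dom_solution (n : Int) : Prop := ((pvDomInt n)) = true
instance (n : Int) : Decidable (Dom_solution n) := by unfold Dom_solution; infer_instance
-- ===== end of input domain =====

-- B replaces A's mirror-and-flip doubling recurrence by an independent closed form per
-- position (odd part of p mod 4); an alternative decomposition, not claimed faster.

-- ===== PORT A =====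
def solution (n : Int) : List Int :=
  (PySem.List.pyRange 1 n 1).foldl (fun answer _i =>
    let len0 : Int := answer.length
    let answer := answer ++ [0]
    (PySem.List.pyRange 0 len0 1).foldl (fun a j =>
      a ++ [if PySem.List.pyGetD a (len0 - 1 - j) 0 == 1 then (0 : Int) else 1]) answer
  ) [0]

-- ===== PORT B =====
-- while q % 2 == 0: q //= 2  (the q ≠ 0 guard only makes the recursion total; every call has q ≥ 1)
def oddPart (q : Nat) : Nat :=
  if _h : q % 2 == 0 ∧ q ≠ 0 then oddPart (q / 2) else q
decreasing_by exact Nat.div_lt_self (Nat.pos_of_ne_zero _h.2) (by omega)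

-- Source B's local L = 2**n - 1 if n > 1 else 1 is written inline
def solution_alt (n : Int) : List Int :=
  (PySem.List.pyRange 1 ((if n > 1 then 2 ^ n.toNat - 1 else 1) + 1) 1).map (fun p =>
    if oddPart p.toNat % 4 == 1 then (0 : Int) else 1)

-- ===== PRECONDITION & SPEC =====
def Spec_solution (n : Int) (out : List Int) : Prop := out = solution_alt n
instance (n : Int) (out : List Int) : Decidable (Spec_solution n out) := by unfold Spec_solution; infer_instance

-- ===== CLAIM (what is proved, stated in full; the proofs are below) =====
def Claim_equal_solution : Prop := ∀ (n : Int), Dom_solution n → Spec_solution n (solution n)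

-- ===== LEMMAS AND PROOFS =====

-- closed-form entry: the paperfolding value at 1-based position p
def pvF (p : Nat) : Int := if oddPart p % 4 == 1 then 0 else 1

def pvFlip (x : Int) : Int := if x == 1 then 0 else 1

-- the ideal doubling recurrence computed by A's outer loop
def pvP : Nat → List Int
  | 0 => [0]
  | k + 1 => pvP k ++ 0 :: ((pvP k).reverse.map pvFlip)

theorem oddPart_odd {q : Nat} (h : q % 2 = 1) : oddPart q = q := by
  unfold oddPart; simp [h]

theorem oddPart_one : oddPart 1 = 1 := oddPart_odd rfl

theorem oddPart_double {q : Nat} (h : q ≠ 0) : oddPart (2 * q) = oddPart q := by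
  rw [oddPart]
  simp [h, Nat.mul_mod_right]

theorem oddPart_pow (m : Nat) : oddPart (2 ^ m) = 1 := by
  induction m with
  | zero => simp [oddPart]
  | succ k ih => rw [pow_succ, mul_comm, oddPart_double (by positivity)]; exact ih

theorem pvF_pow (m : Nat) : pvF (2 ^ m) = 0 := by
  simp [pvF, oddPart_pow]

-- key flip identity: f(2^m + j) = flip (f(2^m - j)) for 1 ≤ j < 2^m
theorem pvF_key (m : Nat) : ∀ j, 1 ≤ j → j < 2 ^ m → pvF (2 ^ m + j) = pvFlip (pvF (2 ^ m - j)) := by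
  induction m with
  | zero => intro j h1 h2; omega
  | succ k ih =>
    intro j h1 h2
    have hp : 2 ^ (k + 1) = 2 ^ k + 2 ^ k := by rw [pow_succ]; omega
    rcases Nat.even_or_odd j with he | ho
    · obtain ⟨j', rfl⟩ := he
      have hj' : 1 ≤ j' := by omega
      have hlt : j' < 2 ^ k := by omega
      have e1 : 2 ^ (k + 1) + (j' + j') = 2 * (2 ^ k + j') := by rw [pow_succ]; ring
      have e2 : 2 ^ (k + 1) - (j' + j') = 2 * (2 ^ k - j') := by omega
      rw [e1, e2]
      unfold pvF
      rw [oddPart_double (by positivity), oddPart_double (by omega)]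
      exact ih j' hj' hlt
    · obtain ⟨t, ht⟩ := ho
      have h2e : 2 ^ (k + 1) % 2 = 0 := by omega
      have hpo : (2 ^ (k + 1) + j) % 2 = 1 := by omega
      have hmo : (2 ^ (k + 1) - j) % 2 = 1 := by omega
      unfold pvF
      rw [oddPart_odd hpo, oddPart_odd hmo]
      rcases Nat.eq_zero_or_pos k with rfl | hk
      · have hj1 : j = 1 := by norm_num at h2; omega
        subst hj1; decide
      · have h4 : 2 ^ (k + 1) = 4 * 2 ^ (k - 1) := by
          rw [show k + 1 = (k - 1) + 2 from by omega, pow_add]; ring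
        have hj4 : j % 4 = 1 ∨ j % 4 = 3 := by omega
        rcases hj4 with h | h
        · have e1 : (2 ^ (k+1) + j) % 4 = 1 := by omega
          have e2 : (2 ^ (k+1) - j) % 4 = 3 := by omega
          simp [e1, e2, pvFlip]
        · have e1 : (2 ^ (k+1) + j) % 4 = 3 := by omega
          have e2 : (2 ^ (k+1) - j) % 4 = 1 := by omega
          simp [e1, e2, pvFlip]

-- the closed-form list of length 2^(k+1) - 1
def pvQ (k : Nat) : List Int := (List.range (2 ^ (k + 1) - 1)).map (fun i => pvF (i + 1))

theorem pvQ_succ (k : Nat) : pvQ (k + 1) = pvQ k ++ 0 :: ((pvQ k).reverse.map pvFlip) := by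
  have hM : 1 ≤ 2 ^ (k + 1) := Nat.one_le_two_pow
  have hpow : 2 ^ (k + 1 + 1) = 2 ^ (k + 1) + 2 ^ (k + 1) := by rw [pow_succ]; omega
  show (List.range (2 ^ (k + 1 + 1) - 1)).map (fun i => pvF (i + 1))
      = (List.range (2 ^ (k + 1) - 1)).map (fun i => pvF (i + 1)) ++
        0 :: (((List.range (2 ^ (k + 1) - 1)).map (fun i => pvF (i + 1))).reverse.map pvFlip)
  apply List.ext_getElem
  · simp; omega
  · intro i hL hR
    simp only [List.getElem_map, List.getElem_range]
    symm
    rw [List.getElem_eq_iff]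
    have hiN : i < 2 ^ (k + 1 + 1) - 1 := by simpa using hL
    have hlen : ((List.range (2 ^ (k + 1) - 1)).map (fun i => pvF (i + 1))).length
        = 2 ^ (k + 1) - 1 := by simp
    rcases Nat.lt_trichotomy i (2 ^ (k + 1) - 1) with hi | hi | hi
    · rw [List.getElem?_append_left (by rw [hlen]; omega)]
      simp [hi]
    · rw [List.getElem?_append_right (by rw [hlen]; omega),
        show i - ((List.range (2 ^ (k + 1) - 1)).map (fun i => pvF (i + 1))).length = 0 from by
          rw [hlen]; omega,
        List.getElem?_cons_zero, show i + 1 = 2 ^ (k + 1) from by omega, pvF_pow]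
    · rw [List.getElem?_append_right (by rw [hlen]; omega),
        show i - ((List.range (2 ^ (k + 1) - 1)).map (fun i => pvF (i + 1))).length
          = (i - (2 ^ (k + 1) - 1) - 1) + 1 from by rw [hlen]; omega,
        List.getElem?_cons_succ, List.getElem?_map,
        List.getElem?_reverse (by rw [hlen]; omega), hlen]
      have hkey := pvF_key (k + 1) (i + 1 - 2 ^ (k + 1)) (by omega) (by omega)
      rw [show i + 1 = 2 ^ (k + 1) + (i + 1 - 2 ^ (k + 1)) from by omega, hkey]
      have hidx : 2 ^ (k + 1) - 1 - 1 - (i - (2 ^ (k + 1) - 1) - 1)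
          = 2 ^ (k + 1) - (i + 1 - 2 ^ (k + 1)) - 1 := by omega
      rw [hidx]
      simp [show 2 ^ (k + 1) - (i + 1 - 2 ^ (k + 1)) - 1 < 2 ^ (k + 1) - 1 from by omega,
        show 2 ^ (k + 1) - (i + 1 - 2 ^ (k + 1)) - 1 + 1 = 2 ^ (k + 1) - (i + 1 - 2 ^ (k + 1)) from by omega]

-- the inner loop of A appends the flipped reverse of the length-len0 prefix
theorem inner_fold (a : List Int) : ∀ (k : Nat) (b : List Int), k ≤ a.length →
    (PySem.List.pyRange ((a.length : Int) - k) (a.length : Int) 1).foldl (fun acc j =>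
      acc ++ [if PySem.List.pyGetD acc ((a.length : Int) - 1 - j) 0 == 1 then (0 : Int) else 1])
      (a ++ 0 :: b)
    = a ++ 0 :: (b ++ ((a.take k).reverse.map pvFlip)) := by
  intro k
  induction k with
  | zero =>
    intro b _
    rw [PySem.List.pyRange_one_eq_nil (by omega)]
    simp
  | succ m ih =>
    intro b hk
    rw [PySem.List.pyRange_one_cons (by omega)]
    simp only [List.foldl_cons]
    have hm : m < a.length := by omega
    have hidx : (a.length : Int) - 1 - ((a.length : Int) - ((m : Nat) + 1 : Nat)) = ((m : Nat) : Int) := by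
      push_cast; ring
    rw [hidx]
    have hget : PySem.List.pyGetD (a ++ 0 :: b) ((m : Nat) : Int) 0 = a[m] := by
      rw [PySem.List.pyGetD_natCast, List.getD_eq_getElem?_getD, List.getElem?_append_left hm,
        List.getElem?_eq_getElem hm]
      rfl
    rw [hget]
    have harg : (a.length : Int) - ((m : Nat) + 1 : Nat) + 1 = (a.length : Int) - ((m : Nat) : Int) := by
      push_cast; ring
    rw [harg]
    have hih := ih (b ++ [if a[m] == 1 then (0 : Int) else 1]) (by omega)
    rw [List.append_assoc, List.cons_append] at hih ⊢
    rw [show ((m : Nat) : Int) = (((m : Nat) : Int)) from rfl] at hih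
    rw [hih]
    have htake : (a.take (m + 1)).reverse = a[m] :: (a.take m).reverse := by
      rw [List.take_add_one, List.getElem?_eq_getElem hm]
      simp
    rw [htake]
    simp [pvFlip]

-- one pass of A's outer loop
theorem step_eq (a : List Int) :
    (PySem.List.pyRange 0 (a.length : Int) 1).foldl (fun acc j =>
      acc ++ [if PySem.List.pyGetD acc ((a.length : Int) - 1 - j) 0 == 1 then (0 : Int) else 1])
      (a ++ [0])
    = a ++ 0 :: (a.reverse.map pvFlip) := by
  have h := inner_fold a a.length [] (le_refl _)
  simpa using h

-- A's outer fold ignores the loop variable: it iterates the step (length l) times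
theorem foldl_const_iterate {α β : Type} (g : α → α) :
    ∀ (l : List β) (init : α), l.foldl (fun acc _ => g acc) init = g^[l.length] init := by
  intro l
  induction l with
  | nil => intro init; rfl
  | cons x t ih =>
    intro init
    simp only [List.foldl_cons, List.length_cons, ih, Function.iterate_succ_apply]

def pvStep (answer : List Int) : List Int :=
  (PySem.List.pyRange 0 (answer.length : Int) 1).foldl (fun a j =>
    a ++ [if PySem.List.pyGetD a ((answer.length : Int) - 1 - j) 0 == 1 then (0 : Int) else 1])
    (answer ++ [0])

theorem iterate_step (k : Nat) : pvStep^[k] [0] = pvP k := by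
  induction k with
  | zero => rfl
  | succ m ih =>
    rw [Function.iterate_succ_apply', ih]
    show pvStep (pvP m) = pvP m ++ 0 :: ((pvP m).reverse.map pvFlip)
    exact step_eq (pvP m)

theorem pvP_eq_pvQ (k : Nat) : pvP k = pvQ k := by
  induction k with
  | zero =>
    show ([0] : List Int) = pvQ 0
    norm_num [pvQ, pvF, List.range_one, oddPart_one]
  | succ m ih =>
    show pvP m ++ 0 :: ((pvP m).reverse.map pvFlip) = pvQ (m + 1)
    rw [ih, pvQ_succ]

theorem solution_eq_pvP (n : Int) (hn : 1 ≤ n) : solution n = pvP (n - 1).toNat := by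
  unfold solution
  have hbody : ∀ (l : List Int),
      l.foldl (fun answer (_i : Int) =>
        (PySem.List.pyRange 0 ((answer.length : Int)) 1).foldl (fun a j =>
          a ++ [if PySem.List.pyGetD a (((answer.length : Int)) - 1 - j) 0 == 1 then (0 : Int) else 1])
          (answer ++ [0])) [0]
      = pvStep^[l.length] [0] := fun l => foldl_const_iterate pvStep l [0]
  rw [hbody (PySem.List.pyRange 1 n 1), PySem.List.length_pyRange_one, iterate_step]

theorem solution_alt_eq_pvQ (n : Int) (hn : 2 ≤ n) : solution_alt n = pvQ (n.toNat - 1) := by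
  unfold solution_alt
  rw [if_pos (by omega : n > 1)]
  have hpos : 1 ≤ (2 : Nat) ^ n.toNat := Nat.one_le_two_pow
  rw [show (2 : Int) ^ n.toNat = ((2 ^ n.toNat : Nat) : Int) from by push_cast; ring,
    show ((2 ^ n.toNat : Nat) : Int) - 1 + 1 = ((2 ^ n.toNat : Nat) : Int) from by ring,
    PySem.List.pyRange_one,
    (by intro m hm; omega : ∀ m : Nat, 1 ≤ m → ((m : Int) - 1).toNat = m - 1) _ hpos]
  unfold pvQ
  rw [show n.toNat - 1 + 1 = n.toNat from by omega, List.map_map]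
  apply List.map_congr_left
  intro i _hi
  simp only [Function.comp_apply]
  rw [show ((1 : Int) + (i : Int)).toNat = i + 1 from by omega]
  rfl

-- ===== VERDICT (by name: the statement is the Claim_ definition above) =====
theorem solution_spec : Claim_equal_solution := by
  intro n _hdom
  unfold Spec_solution
  by_cases hn : 2 ≤ n
  · rw [solution_eq_pvP n (by omega), solution_alt_eq_pvQ n hn, pvP_eq_pvQ]
    congr 1
    omega
  · -- n ≤ 1: A's outer loop is empty, B's bound clamps to 1; both give [0]
    have hA : solution n = [0] := by
      unfold solution
      rw [PySem.List.pyRange_one_eq_nil (by omega)]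
      rfl
    have hB : solution_alt n = [0] := by
      unfold solution_alt
      rw [if_neg (by omega : ¬ n > 1), PySem.List.pyRange_one]
      norm_num [List.range_one, oddPart_one]
    rw [hA, hB]
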